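-- pv_equiv track=rewrite | github.com/rubix5d/SetBits | main.py | setBit
-- ===== SOURCE A (Python) =====
-- def setBit(n):
--   ones = 0
--   zeros = 0
--   while (n > 0):
--     if (n & 1 == 1):
--         ones = ones + 1
--     else:
--        zeros = zeros + 1
--     n = n >> 1
--   return ones, zeros
-- ===== SOURCE B (Python) =====
-- def setBit(n):
--   if n <= 0:
--     return 0, 0
--   ones = bin(n).count('1')
--   return ones, n.bit_length() - ones
-- ===== Notes on version B (the rewrite author's own statement) =====
-- stated objective: simpler
-- what changed: Replaces the bit-by-bit while loop with a closed-form pair: popcount via bin(n).count('1') and zeros via n.bit_length() - ones (nonpositive n have no bits, so (0,0)).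
import Mathlib
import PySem

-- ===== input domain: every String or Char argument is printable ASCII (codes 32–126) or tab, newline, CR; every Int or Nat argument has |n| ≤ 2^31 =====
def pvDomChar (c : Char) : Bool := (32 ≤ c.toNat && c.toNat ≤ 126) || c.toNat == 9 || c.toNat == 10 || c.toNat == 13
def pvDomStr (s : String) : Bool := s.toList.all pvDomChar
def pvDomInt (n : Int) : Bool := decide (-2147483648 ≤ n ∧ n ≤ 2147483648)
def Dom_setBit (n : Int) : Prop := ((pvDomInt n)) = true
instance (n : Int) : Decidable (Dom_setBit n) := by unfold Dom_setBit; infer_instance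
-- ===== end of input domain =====

-- B replaces A's bit-by-bit while loop with a closed-form pair: popcount and
-- bit_length minus popcount (objective: simpler).

-- ===== PORT A =====
-- while (n > 0): test n & 1, bump a counter, n = n >> 1; ported as recursion on n.toNat
def setBitGo (n ones zeros : Int) : Int × Int :=
  if h : n > 0 then
    if PySem.Int.band n 1 == 1 then setBitGo (n >>> (1:Nat)) (ones + 1) zeros
    else setBitGo (n >>> (1:Nat)) ones (zeros + 1)
  else (ones, zeros)
termination_by n.toNat
decreasing_by all_goals · simp only [Int.shiftRight_eq_div_pow]; omega

def setBit (n : Int) : Int × Int := setBitGo n 0 0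

-- ===== PORT B =====
-- ones = bin(n).count('1') → PySem.Int.bitCount; n.bit_length() → PySem.Int.bitLength
def setBit_alt (n : Int) : Int × Int :=
  if n ≤ 0 then (0, 0)
  else
    let ones : Int := (PySem.Int.bitCount n : Int)
    (ones, (PySem.Int.bitLength n : Int) - ones)

-- ===== PRECONDITION & SPEC =====
def Spec_setBit (n : Int) (out : Int × Int) : Prop := out = setBit_alt n
instance (n : Int) (out : Int × Int) : Decidable (Spec_setBit n out) := by unfold Spec_setBit; infer_instance

-- ===== CLAIM (what is proved, stated in full; the proofs are below) =====
def Claim_equal_setBit : Prop := ∀ (n : Int), Dom_setBit n → Spec_setBit n (setBit n)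

-- ===== LEMMAS AND PROOFS =====
theorem shiftRight_one_eq_floordiv (n : Int) : n >>> (1 : Nat) = PySem.Int.floordiv n 2 := by
  unfold PySem.Int.floordiv
  rw [Int.shiftRight_eq_div_pow, Int.fdiv_eq_ediv]
  norm_num

-- loop invariant: the tail of the loop adds the popcount of n to `ones` and the
-- remaining digit count of n to `zeros`
theorem setBitGo_spec (k : Nat) :
    ∀ (n ones zeros : Int), 0 ≤ n → n.toNat ≤ k →
      setBitGo n ones zeros =
        (ones + (PySem.Int.bitCount n : Int),
         zeros + ((PySem.Int.bitLength n : Int) - (PySem.Int.bitCount n : Int))) := by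
  induction k with
  | zero =>
    intro n ones zeros hn hk
    have h0 : n = 0 := by omega
    subst h0
    rw [setBitGo]
    simp
  | succ k ih =>
    intro n ones zeros hn hk
    rw [setBitGo]
    by_cases hpos : n > 0
    · have hfd : 0 ≤ PySem.Int.floordiv n 2 := by
        unfold PySem.Int.floordiv
        rw [Int.fdiv_eq_ediv]; simp; omega
      have hlt : (PySem.Int.floordiv n 2).toNat ≤ k := by
        unfold PySem.Int.floordiv
        rw [Int.fdiv_eq_ediv]; simp; omega
      have hbc := PySem.Int.bitCount_of_pos (n := n) hpos
      have hbl := PySem.Int.bitLength_of_pos (n := n) hpos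
      have hmod : PySem.Int.mod n 2 = n % 2 := by
        unfold PySem.Int.mod
        rw [Int.fmod_eq_emod_of_nonneg _ (by omega)]
      have hband : PySem.Int.band n 1 = n % 2 := by
        rw [PySem.Int.band_one, hmod]
      simp only [dif_pos hpos, shiftRight_one_eq_floordiv]
      by_cases hodd : n % 2 = 1
      · rw [if_pos (by simp [hband, hodd]), ih _ _ _ hfd hlt, hbc, hbl, hmod, hodd]
        push_cast
        simp only [Prod.mk.injEq]
        omega
      · have heven : n % 2 = 0 := by omega
        rw [if_neg (by simp [hband, heven]), ih _ _ _ hfd hlt, hbc, hbl, hmod, heven]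
        push_cast
        simp only [Prod.mk.injEq]
        omega
    · have h0 : n = 0 := by omega
      subst h0
      simp

-- ===== VERDICT (by name: the statement is the Claim_ definition above) =====
theorem setBit_spec : Claim_equal_setBit := by
  intro n _
  unfold Spec_setBit setBit setBit_alt
  by_cases h : n ≤ 0
  · rw [if_pos h, setBitGo]
    simp [show ¬ n > 0 by omega]
  · rw [if_neg h, setBitGo_spec n.toNat n 0 0 (by omega) le_rfl]
    simp
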